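-- pv_equiv track=rewrite | github.com/ChapterBro/hushdesk-macos | src/hushdesk/workers/audit_worker.py | _resolve_report_hall
-- ===== SOURCE A (Python) =====
-- from collections import Counter
--
-- def _resolve_report_hall(hall_counts: Counter[str]) -> str:
--     filtered = Counter(
--         {hall: count for hall, count in hall_counts.items() if hall and hall.lower() != "unknown"}
--     )
--     if not filtered:
--         return "UNKNOWN"
--     most_common = filtered.most_common()
--     top_hall, top_count = most_common[0]
--     tied = [hall for hall, count in most_common if count == top_count]
--     if len(tied) > 1:
--         return "MIXED"
--     return top_hall
-- ===== SOURCE B (Python) =====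
-- def _resolve_report_hall(hall_counts) -> str:
--     groups = {}
--     for hall, count in hall_counts.items():
--         if hall and hall.lower() != "unknown":
--             groups.setdefault(count, []).append(hall)
--     if not groups:
--         return "UNKNOWN"
--     halls = groups[max(groups)]
--     return halls[0] if len(halls) == 1 else "MIXED"
-- ===== Notes on version B (the rewrite author's own statement) =====
-- stated objective: alternative
-- what changed: Instead of sorting the filtered counts with Counter.most_common and scanning the sorted list for ties, B makes one pass building an inverted index mapping each count to the list of halls with that count, then takes the bucket at the maximum key: a multi-element bucket means MIXED, a singleton is the answer.
import Mathlib
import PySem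

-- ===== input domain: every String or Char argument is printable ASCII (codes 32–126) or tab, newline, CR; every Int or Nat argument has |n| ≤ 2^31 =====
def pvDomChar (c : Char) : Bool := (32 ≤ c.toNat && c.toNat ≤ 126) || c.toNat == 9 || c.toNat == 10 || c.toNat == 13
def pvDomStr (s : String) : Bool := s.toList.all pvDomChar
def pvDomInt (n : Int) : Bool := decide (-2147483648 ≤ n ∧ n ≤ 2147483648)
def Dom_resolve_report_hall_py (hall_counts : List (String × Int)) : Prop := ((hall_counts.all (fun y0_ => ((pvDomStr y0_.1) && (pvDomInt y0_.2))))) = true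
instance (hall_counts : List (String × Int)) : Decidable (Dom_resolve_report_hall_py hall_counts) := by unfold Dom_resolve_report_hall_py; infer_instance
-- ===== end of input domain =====

-- B replaces the sort-based most_common + tie scan with a one-pass inverted index count → halls (alternative decomposition, same results).

-- ===== PORT A =====
def resolve_report_hall_py (hall_counts : List (String × Int)) : String :=
  let filtered := hall_counts.filter (fun p => (p.1 != "") && (PySem.Str.lower p.1 != "unknown"))
  if filtered.isEmpty then "UNKNOWN"
  else
    let most_common := PySem.List.sorted filtered (fun p => p.2) true
    let top := most_common.headD ("", 0)
    let tied := most_common.filter (fun p => p.2 == top.2)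
    if tied.length > 1 then "MIXED" else top.1

-- ===== PORT B =====
def resolve_report_hall_py_alt (hall_counts : List (String × Int)) : String :=
  let groups : PySem.Dict Int (List String) :=
    hall_counts.foldl (fun d p =>
      if (p.1 != "") && (PySem.Str.lower p.1 != "unknown")
      then d.modify p.2 [] (· ++ [p.1]) else d) PySem.Dict.empty
  match PySem.List.max? groups.keys (fun k => k) with
  | none => "UNKNOWN"
  | some top =>
    let halls := groups.getD top []
    if halls.length == 1 then halls.headD "" else "MIXED"

-- ===== PRECONDITION & SPEC =====
-- Pre_ excludes lists with duplicate hall names: the Python argument is a dict/Counter, whose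
-- association-list encoding is ambiguous on duplicate keys (the dict silently collapses them).
def Pre_resolve_report_hall_py (hall_counts : List (String × Int)) : Prop :=
  (hall_counts.map Prod.fst).Nodup
instance (hall_counts : List (String × Int)) : Decidable (Pre_resolve_report_hall_py hall_counts) := by unfold Pre_resolve_report_hall_py; infer_instance
def pvWitness_resolve_report_hall_py : (List (String × Int)) := [("a", 2), ("b", 1)]
def Spec_resolve_report_hall_py (hall_counts : List (String × Int)) (out : String) : Prop := out = resolve_report_hall_py_alt hall_counts
instance (hall_counts : List (String × Int)) (out : String) : Decidable (Spec_resolve_report_hall_py hall_counts out) := by unfold Spec_resolve_report_hall_py; infer_instance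

-- ===== CLAIM (what is proved, stated in full; the proofs are below) =====
def Claim_equal_resolve_report_hall_py : Prop := ∀ (hall_counts : List (String × Int)), Dom_resolve_report_hall_py hall_counts → Pre_resolve_report_hall_py hall_counts → Spec_resolve_report_hall_py hall_counts (resolve_report_hall_py hall_counts)

-- ===== LEMMAS AND PROOFS =====

theorem resolve_report_hall_core (hc : List (String × Int)) :
    resolve_report_hall_py hc = resolve_report_hall_py_alt hc := by
  unfold resolve_report_hall_py resolve_report_hall_py_alt
  rw [← List.foldl_filter]
  set l := hc.filter (fun p => (p.1 != "") && (PySem.Str.lower p.1 != "unknown")) with hldef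
  have hkeys : (l.foldl (fun d p => d.modify p.2 [] (· ++ [p.1])) (PySem.Dict.empty : PySem.Dict Int (List String))).keys
      = PySem.Set.ofList (l.map (fun p => p.2)) := by
    rw [PySem.Dict.keys_foldl_modify_key l (fun p => p.2) [] (fun _ p => (· ++ [p.1]))]
    simp [PySem.Set.update_nil_left]
  have hgetD : ∀ c : Int, (l.foldl (fun d p => d.modify p.2 [] (· ++ [p.1])) (PySem.Dict.empty : PySem.Dict Int (List String))).getD c []
      = (l.filter (fun p => p.2 == c)).map (fun p => p.1) := by
    intro c
    have := PySem.Dict.getD_foldl_modify_append (l.map (fun p => (p.2, p.1))) (PySem.Dict.empty : PySem.Dict Int (List String)) c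
    rw [List.foldl_map] at this
    simpa [List.filter_map, List.map_map, Function.comp] using this
  dsimp only
  by_cases hl : l = []
  · simp only [hl]
    rfl
  · obtain ⟨t, rest, hs⟩ := List.exists_cons_of_ne_nil
      (l := PySem.List.sorted l (fun p => p.2) true)
      (by simpa [← List.length_eq_zero_iff, PySem.List.length_sorted] using
        fun h => hl (by simpa [List.length_eq_zero_iff] using h))
    have ht_mem : t ∈ l := by
      have : t ∈ PySem.List.sorted l (fun p => p.2) true := by rw [hs]; exact List.mem_cons_self
      rwa [PySem.List.mem_sorted] at this
    have hge : ∀ y ∈ l, y.2 ≤ t.2 := PySem.List.key_head_sorted_rev_ge l (fun p => p.2) hs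
    have htk : t.2 ∈ (l.foldl (fun d p => d.modify p.2 [] (· ++ [p.1])) (PySem.Dict.empty : PySem.Dict Int (List String))).keys := by
      rw [hkeys, PySem.Set.mem_ofList]
      exact List.mem_map.mpr ⟨t, ht_mem, rfl⟩
    obtain ⟨m, hm⟩ : ∃ m, PySem.List.max? (l.foldl (fun d p => d.modify p.2 [] (· ++ [p.1])) (PySem.Dict.empty : PySem.Dict Int (List String))).keys (fun k => k) = some m := by
      cases h : PySem.List.max? (l.foldl (fun d p => d.modify p.2 [] (· ++ [p.1])) (PySem.Dict.empty : PySem.Dict Int (List String))).keys (fun k => k) with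
      | none => rw [PySem.List.max?_eq_none_iff] at h; rw [h] at htk; cases htk
      | some m => exact ⟨m, rfl⟩
    have hm_eq : m = t.2 := by
      have h1 : t.2 ≤ m := PySem.List.max?_isMax hm t.2 htk
      have h2 : m ≤ t.2 := by
        have := PySem.List.max?_mem hm
        rw [hkeys, PySem.Set.mem_ofList] at this
        obtain ⟨y, hy, hym⟩ := List.mem_map.mp this
        exact hym ▸ hge y hy
      exact le_antisymm h2 h1
    have hperm := PySem.List.sorted_perm l (fun p => p.2) true
    have hlen : (List.filter (fun p => p.2 == t.2) (t :: rest)).length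
        = (l.filter (fun p => p.2 == t.2)).length := by
      rw [← hs, ← List.countP_eq_length_filter, ← List.countP_eq_length_filter]
      exact hperm.countP_eq _
    have hempty : l.isEmpty = false := by simp [hl]
    rw [hm]
    simp only [hempty, Bool.false_eq_true, if_false, hs, List.headD_cons, hgetD, hm_eq]
    have htf : t ∈ l.filter (fun p => p.2 == t.2) := List.mem_filter.mpr ⟨ht_mem, by simp⟩
    rcases hnf : l.filter (fun p => p.2 == t.2) with _ | ⟨q, _ | ⟨q2, qs2⟩⟩
    · rw [hnf] at htf; cases htf
    · rw [hnf] at htf hlen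
      have ht_eq : t = q := by simpa using htf
      have h1 : (List.filter (fun p => p.2 == t.2) (t :: rest)).length = 1 := by
        rw [hlen]; rfl
      rw [hnf, if_neg (by rw [h1]; omega)]
      simp [ht_eq]
    · rw [hnf] at hlen
      have h2 : (List.filter (fun p => p.2 == t.2) (t :: rest)).length > 1 := by
        rw [hlen]; simp only [List.length_cons]; omega
      rw [hnf, if_pos h2]
      simp

-- ===== VERDICT (by name: the statement is the Claim_ definition above) =====
theorem resolve_report_hall_py_spec : Claim_equal_resolve_report_hall_py := by
  intro hc _ _
  unfold Spec_resolve_report_hall_py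
  exact resolve_report_hall_core hc
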